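-- pv_equiv track=rewrite | github.com/Shad-ow1212/BetterAssholeCardGame | main.py | absListe
-- ===== SOURCE A (Python) =====
-- def absListe(liste):
--     temp = 0
--     for l in liste:
--         if l == True:
--             temp += 1
--     if temp == 0:
--         return False
--     elif temp == len(liste):
--         return True
--     else:
--         return None
-- ===== SOURCE B (Python) =====
-- def absListe(liste):
--     if not any(l == True for l in liste):
--         return False
--     if all(l == True for l in liste):
--         return True
--     return None
-- ===== Notes on version B (the rewrite author's own statement) =====
-- stated objective: idiomatic
-- what changed: Replaces the single counting pass (count of True compared to 0 and len) with two short-circuiting predicate passes: any() to detect absence of True, then all() to detect all-True.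
import Mathlib
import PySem

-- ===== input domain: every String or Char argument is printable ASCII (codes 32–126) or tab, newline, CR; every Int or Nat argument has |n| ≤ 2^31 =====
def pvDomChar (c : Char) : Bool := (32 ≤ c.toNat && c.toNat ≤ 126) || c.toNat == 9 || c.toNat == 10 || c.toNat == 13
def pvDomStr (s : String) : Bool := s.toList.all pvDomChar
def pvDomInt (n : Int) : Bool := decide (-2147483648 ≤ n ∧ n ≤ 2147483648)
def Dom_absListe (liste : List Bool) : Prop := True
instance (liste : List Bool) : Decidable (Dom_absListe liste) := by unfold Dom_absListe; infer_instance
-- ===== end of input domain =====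

-- B replaces A's counting loop with two short-circuit predicate passes (any/all); idiomatic, same cost.

-- ===== PORT A =====
-- counting loop: temp counts elements equal to True
def absListe (liste : List Bool) : Option Bool :=
  let temp : Int := liste.foldl (fun t l => if l == true then t + 1 else t) 0
  if temp = 0 then some false
  else if temp = (liste.length : Int) then some true
  else none

-- ===== PORT B =====
def absListe_alt (liste : List Bool) : Option Bool :=
  if !(liste.any (fun l => l == true)) then some false
  else if liste.all (fun l => l == true) then some true
  else none

-- ===== PRECONDITION & SPEC =====
def Spec_absListe (liste : List Bool) (out : Option Bool) : Prop := out = absListe_alt liste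
instance (liste : List Bool) (out : Option Bool) : Decidable (Spec_absListe liste out) := by unfold Spec_absListe; infer_instance

-- ===== CLAIM (what is proved, stated in full; the proofs are below) =====
def Claim_equal_absListe : Prop := ∀ (liste : List Bool), Dom_absListe liste → Spec_absListe liste (absListe liste)

-- ===== LEMMAS AND PROOFS =====
theorem absListe_foldl_count (liste : List Bool) (t : Int) :
    liste.foldl (fun t l => if l == true then t + 1 else t) t
      = t + (liste.countP (fun l => l == true) : Int) := by
  induction liste generalizing t with
  | nil => simp
  | cons x xs ih =>
    simp only [List.foldl_cons, List.countP_cons, ih]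
    by_cases h : x = true <;> simp [h] <;> ring

-- ===== VERDICT (by name: the statement is the Claim_ definition above) =====
theorem absListe_spec : Claim_equal_absListe := by
  intro liste _
  unfold Spec_absListe absListe absListe_alt
  simp only [absListe_foldl_count, zero_add]
  have hc0 : (liste.countP (fun l => l == true) : Int) = 0 ↔
      ¬ liste.any (fun l => l == true) = true := by
    rw [Int.natCast_eq_zero, List.countP_eq_zero, List.any_eq_true]
    simp
  have hcl : (liste.countP (fun l => l == true) : Int) = (liste.length : Int) ↔
      liste.all (fun l => l == true) = true := by
    rw [Int.natCast_inj, List.countP_eq_length, List.all_eq_true]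
  split_ifs with h1 h2 h3 h4 h5 <;> simp_all
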